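-- pv_equiv track=rewrite | github.com/0533orel/Week_11_Kafka_Malicious_Text | common/sentiment.py | sentiment_from_text
-- ===== SOURCE A (Python) =====
-- POSITIVE = {
--     "good","great","love","like","enjoy","happy","success","win","safe","peace","calm","support","hope"
-- }
--
-- NEGATIVE = {
--     "bad","hate","kill","attack","bomb","explode","fear","threat","danger","die","dead","war","hostile"
-- }
--
-- def sentiment_from_text(clean_text: str) -> str:
--     if not clean_text:
--         return "neutral"
--     toks = clean_text.split()
--     score = 0
--     for t in toks:
--         if t in POSITIVE:
--             score += 1
--         if t in NEGATIVE:
--             score -= 1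
--     if score > 0:
--         return "positive"
--     if score < 0:
--         return "negative"
--     return "neutral"
-- ===== SOURCE B (Python) =====
-- POSITIVE = {
--     "good","great","love","like","enjoy","happy","success","win","safe","peace","calm","support","hope"
-- }
--
-- NEGATIVE = {
--     "bad","hate","kill","attack","bomb","explode","fear","threat","danger","die","dead","war","hostile"
-- }
--
-- def sentiment_from_text(clean_text: str) -> str:
--     if not clean_text:
--         return "neutral"
--     counts = {}
--     for t in clean_text.split():
--         counts[t] = counts.get(t, 0) + 1
--     score = sum(counts.get(w, 0) for w in POSITIVE) - sum(counts.get(w, 0) for w in NEGATIVE)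
--     if score > 0:
--         return "positive"
--     if score < 0:
--         return "negative"
--     return "neutral"
-- ===== Notes on version B (the rewrite author's own statement) =====
-- stated objective: alternative
-- what changed: B builds a frequency table of the tokens once and then iterates over the fixed vocabulary sets to accumulate the score, instead of scanning the token stream and testing each token for set membership.
import Mathlib
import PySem

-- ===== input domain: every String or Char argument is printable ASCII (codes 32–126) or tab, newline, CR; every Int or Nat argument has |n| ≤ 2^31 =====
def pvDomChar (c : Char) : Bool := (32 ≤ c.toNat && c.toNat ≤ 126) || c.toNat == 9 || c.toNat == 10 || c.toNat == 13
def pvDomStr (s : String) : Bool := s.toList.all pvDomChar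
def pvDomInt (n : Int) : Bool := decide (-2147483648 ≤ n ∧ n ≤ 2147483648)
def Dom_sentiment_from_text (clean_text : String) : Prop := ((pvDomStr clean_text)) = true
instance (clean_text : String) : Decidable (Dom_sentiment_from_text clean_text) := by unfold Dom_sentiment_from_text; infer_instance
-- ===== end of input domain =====

-- B inverts the traversal: it builds a token-frequency table once, then sums counts over the
-- fixed vocabulary sets instead of testing each token for set membership (objective: alternative).

-- ===== PORT A =====
def pvPOSITIVE : List String :=
  ["good","great","love","like","enjoy","happy","success","win","safe","peace","calm","support","hope"]
def pvNEGATIVE : List String :=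
  ["bad","hate","kill","attack","bomb","explode","fear","threat","danger","die","dead","war","hostile"]

def sentiment_from_text (clean_text : String) : String :=
  if clean_text = "" then "neutral"
  else
    let toks := PySem.Str.split₀ clean_text
    let score := toks.foldl (fun score t =>
      let score := if pvPOSITIVE.contains t then score + 1 else score
      if pvNEGATIVE.contains t then score - 1 else score) (0 : Int)
    if score > 0 then "positive"
    else if score < 0 then "negative"
    else "neutral"

-- ===== PORT B =====
def sentiment_from_text_alt (clean_text : String) : String :=
  if clean_text = "" then "neutral"
  else
    let counts := PySem.Dict.counter (PySem.Str.split₀ clean_text)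
    let score := (pvPOSITIVE.map (fun w => counts.getD w 0)).sum
               - (pvNEGATIVE.map (fun w => counts.getD w 0)).sum
    if score > 0 then "positive"
    else if score < 0 then "negative"
    else "neutral"

-- ===== PRECONDITION & SPEC =====
def Spec_sentiment_from_text (clean_text : String) (out : String) : Prop := out = sentiment_from_text_alt clean_text
instance (clean_text : String) (out : String) : Decidable (Spec_sentiment_from_text clean_text out) := by unfold Spec_sentiment_from_text; infer_instance

-- ===== CLAIM (what is proved, stated in full; the proofs are below) =====
def Claim_equal_sentiment_from_text : Prop := ∀ (clean_text : String), Dom_sentiment_from_text clean_text → Spec_sentiment_from_text clean_text (sentiment_from_text clean_text)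

-- ===== LEMMAS AND PROOFS =====

-- consing one token adds (vocab.count t) to the vocabulary-indexed count sum
lemma pv_sum_count_cons (vocab : List String) (t : String) (ts : List String) :
    (vocab.map (fun w => ((t :: ts).count w : Int))).sum
      = (vocab.map (fun w => (ts.count w : Int))).sum + (vocab.count t : Int) := by
  induction vocab with
  | nil => simp
  | cons v vs ih =>
      simp only [List.map_cons, List.sum_cons, ih]
      rw [List.count_cons, List.count_cons]
      by_cases h : v = t
      · subst h; simp only [beq_self_eq_true, if_true]; push_cast; ring
      · have h1 : (v == t) = false := by simp [h]
        have h2 : (t == v) = false := by simp [Ne.symm h]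
        simp only [h1, h2]; push_cast; ring

-- on a nodup vocabulary, count t = indicator of membership
lemma pv_count_nodup (vocab : List String) (hn : vocab.Nodup) (t : String) :
    (vocab.count t : Int) = if vocab.contains t then 1 else 0 := by
  by_cases h : t ∈ vocab
  · simp [List.count_eq_one_of_mem hn h, h]
  · simp [List.count_eq_zero_of_not_mem h, h]

-- A's single-pass score fold equals B's vocabulary-indexed sum of counts
lemma pv_score_eq (toks : List String) (a : Int) :
    toks.foldl (fun score t =>
      let score := if pvPOSITIVE.contains t then score + 1 else score
      if pvNEGATIVE.contains t then score - 1 else score) a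
    = a + ((pvPOSITIVE.map (fun w => (toks.count w : Int))).sum
         - (pvNEGATIVE.map (fun w => (toks.count w : Int))).sum) := by
  induction toks generalizing a with
  | nil => simp
  | cons t ts ih =>
      have hp : pvPOSITIVE.Nodup := by decide
      have hn : pvNEGATIVE.Nodup := by decide
      simp only [List.foldl_cons, ih, pv_sum_count_cons,
        pv_count_nodup _ hp t, pv_count_nodup _ hn t]
      split_ifs <;> ring

-- ===== VERDICT (by name: the statement is the Claim_ definition above) =====
theorem sentiment_from_text_spec : Claim_equal_sentiment_from_text := by
  intro s _
  unfold Spec_sentiment_from_text sentiment_from_text sentiment_from_text_alt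
  by_cases h : s = ""
  · simp [h]
  · simp only [h, if_false]
    have := pv_score_eq (PySem.Str.split₀ s) 0
    simp only [PySem.Dict.getD_counter, this, zero_add]
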